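-- pv_equiv track=rewrite | github.com/lazarevic993/python | main.py | parsing_string_values
-- ===== SOURCE A (Python) =====
-- def parsing_string_values(item):
--     key = ""
--     value = ""
--     equal_sign = 0
--
--     for char in item:
--
--         if char != "=" and equal_sign == 0:
--             key += char
--
--         if char == "=":
--             equal_sign = 1
--             continue
--
--         if char != "=" and equal_sign == 1:
--             value += char
--
--     return key, value
-- ===== SOURCE B (Python) =====
-- def parsing_string_values(item):
--     idx = item.find("=")
--     if idx == -1:
--         return item, ""
--     return item[:idx], item[idx + 1:].replace("=", "")
-- ===== Notes on version B (the rewrite author's own statement) =====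
-- stated objective: simpler
-- what changed: Replaces the flag-driven per-character accumulation loop with locate-then-slice: find the first '=', slice the key and value, and drop remaining '=' signs with replace.
import Mathlib
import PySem

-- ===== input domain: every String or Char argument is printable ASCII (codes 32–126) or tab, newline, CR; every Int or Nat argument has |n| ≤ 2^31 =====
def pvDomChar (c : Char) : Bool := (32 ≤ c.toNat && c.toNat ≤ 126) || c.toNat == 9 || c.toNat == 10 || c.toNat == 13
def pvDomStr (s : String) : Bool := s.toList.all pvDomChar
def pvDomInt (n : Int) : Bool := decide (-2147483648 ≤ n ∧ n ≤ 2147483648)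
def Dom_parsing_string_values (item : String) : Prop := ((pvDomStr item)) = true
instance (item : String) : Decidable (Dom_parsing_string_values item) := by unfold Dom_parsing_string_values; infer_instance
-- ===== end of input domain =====

-- B replaces A's flag-driven per-character loop by locate-then-slice (find the first '=',
-- slice key/value, drop later '=' with replace); objective: simpler.

-- ===== PORT A =====
-- the flag-driven loop: state is (key, value, equal_sign), built char by char
def parsing_string_values (item : String) : String × String :=
  let st := item.toList.foldl
    (fun (st : List Char × List Char × Int) char =>
      let key := st.1
      let value := st.2.1
      let equal_sign := st.2.2
      let key := if char ≠ '=' ∧ equal_sign = 0 then key ++ [char] else key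
      if char = '=' then (key, value, 1)        -- sets the flag and 'continue'
      else
        let value := if char ≠ '=' ∧ equal_sign = 1 then value ++ [char] else value
        (key, value, equal_sign))
    ([], [], 0)
  (String.ofList st.1, String.ofList st.2.1)

-- ===== PORT B =====
def parsing_string_values_alt (item : String) : String × String :=
  let idx := PySem.Str.find item "="
  if idx = -1 then (item, "")
  else (PySem.Str.slice item none (some idx),
        PySem.Str.replace (PySem.Str.slice item (some (idx + 1)) none) "=" "")

-- ===== PRECONDITION & SPEC =====
def Spec_parsing_string_values (item : String) (out : String × String) : Prop := out = parsing_string_values_alt item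
instance (item : String) (out : String × String) : Decidable (Spec_parsing_string_values item out) := by unfold Spec_parsing_string_values; infer_instance

-- ===== CLAIM (what is proved, stated in full; the proofs are below) =====
def Claim_equal_parsing_string_values : Prop := ∀ (item : String), Dom_parsing_string_values item → Spec_parsing_string_values item (parsing_string_values item)

-- ===== LEMMAS AND PROOFS =====

-- the loop body of port A, named for the proofs
def pvLoopBody (st : List Char × List Char × Int) (char : Char) : List Char × List Char × Int :=
  let key := st.1
  let value := st.2.1
  let equal_sign := st.2.2
  let key := if char ≠ '=' ∧ equal_sign = 0 then key ++ [char] else key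
  if char = '=' then (key, value, 1)
  else
    let value := if char ≠ '=' ∧ equal_sign = 1 then value ++ [char] else value
    (key, value, equal_sign)

lemma pvFoldA_eq (l : List Char) (st : List Char × List Char × Int) :
    l.foldl
    (fun (st : List Char × List Char × Int) char =>
      let key := st.1
      let value := st.2.1
      let equal_sign := st.2.2
      let key := if char ≠ '=' ∧ equal_sign = 0 then key ++ [char] else key
      if char = '=' then (key, value, 1)
      else
        let value := if char ≠ '=' ∧ equal_sign = 1 then value ++ [char] else value
        (key, value, equal_sign)) st = l.foldl pvLoopBody st := rfl

-- after the flag is set, every non-'=' char goes to value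
lemma pvLoop_flag1 (l : List Char) (k v : List Char) :
    l.foldl pvLoopBody (k, v, 1) = (k, v ++ l.filter (fun c => c != '='), 1) := by
  induction l generalizing v with
  | nil => simp
  | cons c t ih =>
    by_cases hc : c = '='
    · subst hc; simp [pvLoopBody, ih]
    · simp [pvLoopBody, hc, ih]

-- before the flag is set: key grows up to the first '=', then pvLoop_flag1 takes over
lemma pvLoop_flag0 (l : List Char) (k v : List Char) :
    l.foldl pvLoopBody (k, v, 0) =
      if '=' ∈ l then
        (k ++ l.takeWhile (fun c => c != '='),
         v ++ ((l.dropWhile (fun c => c != '=')).tail.filter (fun c => c != '=')), 1)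
      else (k ++ l, v, 0) := by
  induction l generalizing k with
  | nil => simp
  | cons c t ih =>
    by_cases hc : c = '='
    · subst hc; simp [pvLoopBody, pvLoop_flag1]
    · have hc' : ¬ ('=' = c) := fun hh => hc hh.symm
      simp [pvLoopBody, hc, hc', ih]

-- find.go specialised to the single-character needle "="
lemma pvFindGo_eq (l : List Char) (k : Nat) :
    PySem.Chars.find.go ['='] l k =
      if '=' ∈ l then ((k : Int) + (l.takeWhile (fun c => c != '=')).length) else -1 := by
  induction l generalizing k with
  | nil => simp [PySem.Chars.find.go]
  | cons c t ih =>
    by_cases hc : c = '='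
    · subst hc; simp [PySem.Chars.find.go, List.isPrefixOf]
    · have hc' : ¬ ('=' = c) := fun hh => hc hh.symm
      simp [PySem.Chars.find.go, List.isPrefixOf, hc, hc', ih]
      by_cases hm : '=' ∈ t <;> simp [hm] <;> omega

-- replace.go specialised to old = ['='], new = []: it filters out '='
lemma pvReplaceGo_eq (fuel : Nat) (l acc : List Char) (h : l.length ≤ fuel) :
    PySem.Chars.replace.go ['='] [] fuel l acc =
      acc.reverse ++ l.filter (fun c => c != '=') := by
  induction fuel generalizing l acc with
  | zero =>
    have : l = [] := List.eq_nil_of_length_eq_zero (Nat.le_zero.mp h)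
    subst this; simp [PySem.Chars.replace.go]
  | succ n ih =>
    cases l with
    | nil => simp [PySem.Chars.replace.go]
    | cons c t =>
      by_cases hc : c = '='
      · subst hc
        simp only [PySem.Chars.replace.go, List.isPrefixOf, BEq.rfl, Bool.and_self, if_pos]
        simp at h
        rw [show List.drop (List.length ['=']) ('=' :: t) = t by simp,
            show ([] : List Char).reverse ++ acc = acc by simp]
        rw [ih t acc (by omega)]
        simp
      · have hpre : List.isPrefixOf ['='] (c :: t) = false := by
          simp [List.isPrefixOf]; exact fun hh => hc hh.symm
        simp only [PySem.Chars.replace.go, hpre, Bool.false_eq_true, if_neg, not_false_iff]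
        simp at h
        rw [ih t (c :: acc) (by omega)]
        simp [hc]

lemma pvReplace_eq (l : List Char) :
    PySem.Chars.replace l ['='] [] = l.filter (fun c => c != '=') := by
  simp [PySem.Chars.replace]
  rw [pvReplaceGo_eq l.length l [] le_rfl]
  simp

-- drop past the takeWhile prefix lands on the dropWhile suffix
lemma pvDrop_len_takeWhile (p : Char → Bool) (l : List Char) :
    l.drop (l.takeWhile p).length = l.dropWhile p := by
  have h2 : l.takeWhile p ++ l.dropWhile p = l := List.takeWhile_append_dropWhile
  nth_rewrite 2 [← h2]
  rw [List.drop_left]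

-- ===== VERDICT (by name: the statement is the Claim_ definition above) =====
theorem parsing_string_values_spec : Claim_equal_parsing_string_values := by
  intro item _
  unfold Spec_parsing_string_values parsing_string_values parsing_string_values_alt
  rw [pvFoldA_eq, pvLoop_flag0]
  have hfind : PySem.Str.find item "=" =
      (if '=' ∈ item.toList then ((item.toList.takeWhile (fun c => c != '=')).length : Int) else -1) := by
    show PySem.Chars.find.go ['='] item.toList 0 = _
    rw [pvFindGo_eq]; simp
  rw [hfind]
  by_cases hm : '=' ∈ item.toList
  · have hlen : ¬ (((item.toList.takeWhile (fun c => c != '=')).length : Int) = -1) := by omega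
    simp only [hm, if_true]
    rw [if_neg hlen]
    have htake : item.toList.take (item.toList.takeWhile (fun c => c != '=')).length
        = item.toList.takeWhile (fun c => c != '=') :=
      (List.prefix_iff_eq_take.mp (List.takeWhile_prefix _)).symm
    refine Prod.ext_iff.mpr ⟨?_, ?_⟩
    · -- key component
      apply String.toList_inj.mp
      simp only [PySem.Str.toList_slice, PySem.Chars.slice_eq_listSlice, String.toList_ofList]
      rw [PySem.List.slice_to_natCast]
      simp [htake]
    · -- value component
      apply String.toList_inj.mp
      rw [PySem.Str.toList_replace]
      simp only [PySem.Str.toList_slice, PySem.Chars.slice_eq_listSlice, String.toList_ofList]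
      rw [show (((item.toList.takeWhile (fun c => c != '=')).length : Int) + 1)
            = (((item.toList.takeWhile (fun c => c != '=')).length + 1 : Nat) : Int) by push_cast; ring]
      rw [PySem.List.slice_from_natCast]
      rw [show (item.toList.takeWhile (fun c => c != '=')).length + 1
            = (item.toList.takeWhile (fun c => c != '=')).length + 1 from rfl,
          ← List.tail_drop, pvDrop_len_takeWhile]
      show _ = PySem.Chars.replace _ ("=".toList) ("".toList)
      rw [show ("=".toList) = ['='] from rfl, show ("".toList) = ([] : List Char) from rfl]
      rw [pvReplace_eq]
      simp
  · simp only [hm, if_false]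
    rw [if_pos (by trivial)]
    refine Prod.ext_iff.mpr ⟨?_, ?_⟩ <;> simp
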